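-- pv_equiv track=rewrite | github.com/srivatsansoma/pravahan | pravahan_pi/can_decoder.py | decode_bigend_sig
-- ===== SOURCE A (Python) =====
-- def get_bit_val(bytes_array, byte_pos, bit_pos):
--     return (bytes_array[byte_pos] >> bit_pos) & 1
--
-- def decode_bigend_sig(bytes_array, start, len):
--     val = 0
--     byte = start // 8
--     bit = start - byte * 8
--
--     for i in range(len):
--         val = val | (get_bit_val(bytes_array, byte, bit) << (len - 1 - i))
--
--         if bit == 0:
--             bit = 7
--             byte += 1
--         else:
--             bit -= 1
--
--     return val
-- ===== SOURCE B (Python) =====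
-- def decode_bigend_sig(bytes_array, start, len):
--     # Per-byte chunking: take the run of bits from the current in-byte
--     # position down to bit 0 (or fewer for the final byte) in one step,
--     # accumulating Horner-style.
--     byte = start // 8
--     bit = start % 8
--     val = 0
--     remaining = len
--     while remaining > 0:
--         take = bit + 1 if bit + 1 <= remaining else remaining
--         chunk = (bytes_array[byte] // 2 ** (bit + 1 - take)) % 2 ** take
--         val = val * 2 ** take + chunk
--         remaining -= take
--         byte += 1
--         bit = 7
--     return val
-- ===== Notes on version B (the rewrite author's own statement) =====
-- stated objective: faster
-- what changed: Replaces the per-bit loop (one shift/mask/or per bit) by a per-byte pass that extracts each byte's contiguous run of wanted bits as one floor-div/mod chunk and adds it at the right weight, doing ~len/8 iterations instead of len.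
import Mathlib
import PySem

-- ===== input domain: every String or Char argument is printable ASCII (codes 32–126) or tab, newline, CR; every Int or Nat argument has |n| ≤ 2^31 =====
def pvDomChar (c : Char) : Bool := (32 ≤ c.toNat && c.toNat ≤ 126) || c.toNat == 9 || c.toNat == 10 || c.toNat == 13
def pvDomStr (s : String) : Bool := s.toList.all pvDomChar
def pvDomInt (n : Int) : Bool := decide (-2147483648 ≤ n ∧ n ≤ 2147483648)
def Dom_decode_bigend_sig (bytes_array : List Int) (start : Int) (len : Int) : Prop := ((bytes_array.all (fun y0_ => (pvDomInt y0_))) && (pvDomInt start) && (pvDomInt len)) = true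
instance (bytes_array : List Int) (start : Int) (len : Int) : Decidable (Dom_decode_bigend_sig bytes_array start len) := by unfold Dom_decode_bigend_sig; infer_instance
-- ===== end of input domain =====

-- B replaces A's per-bit shift/mask/or loop by a per-byte pass that takes each byte's
-- contiguous run of wanted bits as one floor-div/mod chunk (objective: faster, ~len/8
-- iterations instead of len; same bytes read in the same order).

-- ===== PORT A =====
-- xs[byte_pos] is pyGetD with default 0: Pre_ excludes the IndexError inputs.
-- bit_pos is 0..7 at every call (so .toNat on the shift amount is exact; Python would
-- raise on a negative shift, which never happens here).
def get_bit_val (bytes_array : List Int) (byte_pos : Int) (bit_pos : Int) : Int :=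
  PySem.Int.band ((PySem.List.pyGetD bytes_array byte_pos 0) >>> bit_pos.toNat) 1

-- the body of A's for-loop; state = (val, byte, bit); len - 1 - i ≥ 0 inside the loop
def decodeStepA (bytes_array : List Int) (len : Int) (st : Int × Int × Int) (i : Int) :
    Int × Int × Int :=
  let val := PySem.Int.bor st.1 ((get_bit_val bytes_array st.2.1 st.2.2) <<< (len - 1 - i).toNat)
  if st.2.2 = 0 then (val, st.2.1 + 1, 7) else (val, st.2.1, st.2.2 - 1)

def decode_bigend_sig (bytes_array : List Int) (start : Int) (len : Int) : Int :=
  let byte := PySem.Int.floordiv start 8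
  let bit := start - byte * 8
  ((PySem.List.pyRange 0 len 1).foldl (decodeStepA bytes_array len) (0, byte, bit)).1

-- ===== PORT B =====
-- Source B's while-loop (Horner accumulation); `remaining` and `bit` are Nats: remaining starts as len.toNat
-- (exact: a non-positive Python len runs zero iterations) and bit as (start % 8).toNat
-- (exact: Python's start % 8 is in 0..7).  take ≥ 1, so remaining decreases.
def decodeChunks (bytes_array : List Int) (byte : Int) (bit : Nat) (remaining : Nat)
    (val : Int) : Int :=
  if remaining = 0 then val
  else
    let take := if bit + 1 ≤ remaining then bit + 1 else remaining
    let chunk := PySem.Int.mod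
      (PySem.Int.floordiv (PySem.List.pyGetD bytes_array byte 0) (2 ^ (bit + 1 - take)))
      (2 ^ take)
    decodeChunks bytes_array (byte + 1) 7 (remaining - take) (val * 2 ^ take + chunk)
termination_by remaining
decreasing_by split <;> omega

def decode_bigend_sig_alt (bytes_array : List Int) (start : Int) (len : Int) : Int :=
  decodeChunks bytes_array (PySem.Int.floordiv start 8) (PySem.Int.mod start 8).toNat
    len.toNat 0

-- ===== PRECONDITION & SPEC =====
-- Pre_ excludes exactly the IndexError inputs: for len > 0 every accessed byte index
-- (the consecutive run start//8 .. start//8 + nbytes - 1, Python negative indexing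
-- allowed on the left end) must be in range.
def Pre_decode_bigend_sig (bytes_array : List Int) (start : Int) (len : Int) : Prop :=
  len ≤ 0 ∨
    (-(bytes_array.length : Int) ≤ PySem.Int.floordiv start 8 ∧
      PySem.Int.floordiv start 8
        + PySem.Int.floordiv (7 - PySem.Int.mod start 8 + len + 7) 8 - 1
        < (bytes_array.length : Int))
instance (bytes_array : List Int) (start : Int) (len : Int) :
    Decidable (Pre_decode_bigend_sig bytes_array start len) := by
  unfold Pre_decode_bigend_sig; infer_instance

def pvWitness_decode_bigend_sig : List Int × Int × Int := ([1, 2], 0, 8)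

def Spec_decode_bigend_sig (bytes_array : List Int) (start : Int) (len : Int) (out : Int) : Prop := out = decode_bigend_sig_alt bytes_array start len
instance (bytes_array : List Int) (start : Int) (len : Int) (out : Int) : Decidable (Spec_decode_bigend_sig bytes_array start len out) := by unfold Spec_decode_bigend_sig; infer_instance

-- ===== CLAIM (what is proved, stated in full; the proofs are below) =====
def Claim_equal_decode_bigend_sig : Prop := ∀ (bytes_array : List Int) (start : Int) (len : Int), Dom_decode_bigend_sig bytes_array start len → Pre_decode_bigend_sig bytes_array start len → Spec_decode_bigend_sig bytes_array start len (decode_bigend_sig bytes_array start len)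

-- ===== LEMMAS AND PROOFS =====

-- the common big-endian reading of n bits starting at (byte, bit), per bit
def G (xs : List Int) (byte bit : Int) : Nat → Int
  | 0 => 0
  | n+1 =>
      PySem.Int.mod (PySem.Int.floordiv (PySem.List.pyGetD xs byte 0) (2 ^ bit.toNat)) 2 * 2 ^ n
        + (if bit = 0 then G xs (byte + 1) 7 n else G xs byte (bit - 1) n)

-- disjoint Nat or is add
lemma natOr_disjoint : ∀ (n : Nat) (c b : Nat), b < 2 ^ n → (2 ^ n * c) ||| b = 2 ^ n * c + b := by
  intro n
  induction n with
  | zero =>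
    intro c b hb
    interval_cases b
    simp
  | succ n ih =>
    intro c b hb
    have hb2 : b / 2 < 2 ^ n := by omega
    have h := ih c (b / 2) hb2
    have hbit : b % 2 = 0 ∨ b % 2 = 1 := by omega
    have e1 : 2 ^ (n+1) * c = Nat.bit false (2 ^ n * c) := by
      simp [Nat.bit]; ring
    rcases hbit with h0 | h1
    · have e2 : b = Nat.bit false (b / 2) := by simp [Nat.bit]; omega
      rw [e1, e2, Nat.lor_bit]
      simp [Nat.bit, h]
      omega
    · have e2 : b = Nat.bit true (b / 2) := by simp [Nat.bit]; omega
      rw [e1, e2, Nat.lor_bit]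
      simp [Nat.bit, h]
      omega

-- disjoint Python or on Ints is add
lemma borDisjoint (a x : Int) (n : Nat) (ha : 0 ≤ a) (hd : (2 ^ n : Int) ∣ a)
    (hx0 : 0 ≤ x) (hx : x < 2 ^ n) : PySem.Int.bor a x = a + x := by
  obtain ⟨c, hc⟩ := hd
  have hpow : (0:Int) < 2 ^ n := by positivity
  have hc0 : 0 ≤ c := by nlinarith
  have hA : a.toNat = 2 ^ n * c.toNat := by
    rw [hc, Int.toNat_mul (le_of_lt hpow) hc0]
    rfl
  have hXn : x.toNat < 2 ^ n := by
    have h1 : ((x.toNat : Int)) = x := Int.toNat_of_nonneg hx0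
    have h2 : (((2:Nat) ^ n : Nat) : Int) = 2 ^ n := by push_cast; ring
    omega
  rw [PySem.Int.bor, if_pos ha, if_pos hx0, hA, natOr_disjoint n _ _ hXn]
  push_cast [← hA, Int.toNat_of_nonneg ha, Int.toNat_of_nonneg hx0]
  ring

-- split off the low t-block of an emod tower
lemma powsplit (X : Int) (t : Nat) :
    X / 2 ^ t % 2 * 2 ^ t + X % 2 ^ t = X % 2 ^ (t + 1) := by
  have h1 : (0:Int) < 2 ^ t := by positivity
  have h2 : X % 2 ^ t + 2 ^ t * (X / 2 ^ t) = X := Int.emod_add_mul_ediv X (2 ^ t)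
  have h3 : X / 2 ^ t % 2 + 2 * (X / 2 ^ t / 2) = X / 2 ^ t := Int.emod_add_mul_ediv _ 2
  have hlo : 0 ≤ X % 2 ^ t := Int.emod_nonneg X (by positivity)
  have hhi : X % 2 ^ t < 2 ^ t := Int.emod_lt_of_pos X h1
  have hb : X / 2 ^ t % 2 = 0 ∨ X / 2 ^ t % 2 = 1 := by omega
  have hX : X = (X / 2 ^ t % 2 * 2 ^ t + X % 2 ^ t) + X / 2 ^ t / 2 * 2 ^ (t+1) := by
    rw [pow_succ]; nlinarith [h2, h3]
  have key : X % 2 ^ (t+1) = X / 2 ^ t % 2 * 2 ^ t + X % 2 ^ t := by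
    conv_lhs => rw [hX]
    rw [Int.add_mul_emod_self_right]
    apply Int.emod_eq_of_lt
    · rcases hb with h | h <;> rw [h] <;> omega
    · rw [pow_succ]; rcases hb with h | h <;> rw [h] <;> omega
  omega

-- A's foldl computes G
lemma foldA (xs : List Int) (L : Int) :
    ∀ (n : Nat) (i byte bit val : Int), i + n = L → 0 ≤ val → (2 ^ n : Int) ∣ val →
      ((PySem.List.pyRange i L 1).foldl (decodeStepA xs L) (val, byte, bit)).1
        = val + G xs byte bit n := by
  intro n
  induction n with
  | zero =>
    intro i byte bit val hiL hv0 hvd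
    rw [PySem.List.pyRange_one_eq_nil (by omega)]
    simp [G]
  | succ n ih =>
    intro i byte bit val hiL hv0 hvd
    have hiltL : i < L := by push_cast at hiL; omega
    rw [PySem.List.pyRange_one_cons hiltL]
    simp only [List.foldl_cons]
    have hsh : (L - 1 - i).toNat = n := by push_cast at hiL; omega
    have hgbv : get_bit_val xs byte bit
        = PySem.Int.mod (PySem.Int.floordiv (PySem.List.pyGetD xs byte 0) (2 ^ bit.toNat)) 2 := by
      rw [get_bit_val, PySem.Int.band_one, Int.shiftRight_eq_div_pow,
        ← PySem.Int.floordiv_eq_ediv_of_pos (b := ((2 ^ bit.toNat : Nat) : Int)) (by positivity)]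
      norm_cast
    have hg0 : 0 ≤ get_bit_val xs byte bit := by
      rw [hgbv]; exact PySem.Int.mod_nonneg _ (by norm_num)
    have hg2 : get_bit_val xs byte bit < 2 := by
      rw [hgbv]; exact PySem.Int.mod_lt _ (by norm_num)
    have hpn : (0:Int) < 2 ^ n := by positivity
    obtain ⟨d, hd⟩ := hvd
    have hvd : (2 ^ (n+1) : Int) ∣ val := ⟨d, hd⟩
    have hstep : decodeStepA xs L (val, byte, bit) i
        = (val + get_bit_val xs byte bit * 2 ^ n,
           if bit = 0 then (byte + 1, (7:Int)) else (byte, bit - 1)) := by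
      rw [decodeStepA]
      simp only [hsh, Int.shiftLeft_eq]
      rw [borDisjoint val (get_bit_val xs byte bit * 2 ^ n) (n + 1) hv0 hvd
        (by positivity) (by rw [pow_succ]; nlinarith [hpn, hg2])]
      split <;> rfl
    rw [hstep]
    have hdvd' : (2 ^ n : Int) ∣ val + get_bit_val xs byte bit * 2 ^ n :=
      ⟨2 * d + get_bit_val xs byte bit, by rw [hd]; ring⟩
    have hv0' : 0 ≤ val + get_bit_val xs byte bit * 2 ^ n := by positivity
    split
    · rw [ih (i + 1) (byte + 1) 7 _ (by push_cast at hiL ⊢; omega) hv0' hdvd']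
      rw [hgbv]
      simp only [G]
      split
      · ring
      · omega
    · rw [ih (i + 1) byte (bit - 1) _ (by push_cast at hiL ⊢; omega) hv0' hdvd']
      rw [hgbv]
      simp only [G]
      split
      · omega
      · ring

-- one chunk of B equals `take` steps of G
lemma Gsplit (xs : List Int) :
    ∀ (t bit r : Nat) (byte : Int), t ≤ bit + 1 → t ≤ r → (t = bit + 1 ∨ t = r) →
      G xs byte (bit : Int) r
        = PySem.Int.mod
            (PySem.Int.floordiv (PySem.List.pyGetD xs byte 0) (2 ^ (bit + 1 - t))) (2 ^ t)
            * 2 ^ (r - t)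
          + (if t = bit + 1 then G xs (byte + 1) 7 (r - t) else 0) := by
  intro t
  induction t with
  | zero =>
    intro bit r byte h1 h2 h3
    have hr : r = 0 := by omega
    subst hr
    have h01 : (0:Nat) ≠ bit + 1 := by omega
    have hm : PySem.Int.mod
        (PySem.Int.floordiv (PySem.List.pyGetD xs byte 0) (2 ^ (bit + 1 - 0))) (2 ^ (0:Nat)) = 0 := by
      have hlo := PySem.Int.mod_nonneg
        (PySem.Int.floordiv (PySem.List.pyGetD xs byte 0) (2 ^ (bit + 1 - 0))) (b := (2 ^ (0:Nat) : Int)) (by norm_num)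
      have hhi := PySem.Int.mod_lt
        (PySem.Int.floordiv (PySem.List.pyGetD xs byte 0) (2 ^ (bit + 1 - 0))) (b := (2 ^ (0:Nat) : Int)) (by norm_num)
      omega
    rw [hm, if_neg h01]
    simp [G]
  | succ t ih =>
    intro bit r byte h1 h2 h3
    cases r with
    | zero => omega
    | succ r' =>
      have htr : t ≤ r' := by omega
      cases bit with
      | zero =>
        have ht0 : t = 0 := by omega
        subst ht0
        simp only [G, Nat.cast_zero, Int.toNat_zero]
        norm_num
      | succ s =>
        have hcast1 : ((s + 1 : Nat) : Int) ≠ 0 := by push_cast; omega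
        have hcast2 : ((s + 1 : Nat) : Int) - 1 = (s : Int) := by push_cast; ring
        have hcast3 : ((s + 1 : Nat) : Int).toNat = s + 1 := by omega
        have hih := ih s r' byte (by omega) htr (by omega)
        simp only [G, if_neg hcast1, hcast2, hcast3]
        rw [hih]
        -- arithmetic core
        have hp1 : (0:Int) < 2 ^ (s + 1 - t) := by positivity
        have hp2 : (0:Int) < 2 ^ t := by positivity
        have hp3 : (0:Int) < 2 ^ (s + 1) := by positivity
        have hp4 : (0:Int) < 2 ^ (t + 1) := by positivity
        have hss : s + 1 + 1 - (t + 1) = s + 1 - t := by omega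
        rw [hss]
        set B := PySem.List.pyGetD xs byte 0 with hB
        set X : Int := B / 2 ^ (s + 1 - t) with hXdef
        have hfd1 : PySem.Int.floordiv B (2 ^ (s + 1 - t)) = X :=
          PySem.Int.floordiv_eq_ediv_of_pos hp1
        have hfd2 : PySem.Int.floordiv B (2 ^ (s + 1)) = X / 2 ^ t := by
          rw [PySem.Int.floordiv_eq_ediv_of_pos hp3, hXdef,
            Int.ediv_ediv_of_nonneg (le_of_lt hp1), ← pow_add]
          congr 2
          omega
        rw [hfd1, hfd2, PySem.Int.mod_eq_emod_of_pos (by norm_num),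
          PySem.Int.mod_eq_emod_of_pos hp2, PySem.Int.mod_eq_emod_of_pos hp4]
        have hiff : (t + 1 = s + 1 + 1) ↔ (t = s + 1) := by omega
        have hsub : r' + 1 - (t + 1) = r' - t := by omega
        have hps := powsplit X t
        have hsplit2 : (2:Int) ^ r' = 2 ^ t * 2 ^ (r' - t) := by
          rw [← pow_add]
          congr 1
          omega
        simp only [hsub, hiff]
        rw [← hps, hsplit2]
        ring

-- B's loop computes G
lemma chunkG (xs : List Int) :
    ∀ (r : Nat) (byte : Int) (bit : Nat) (val : Int),
      decodeChunks xs byte bit r val = val * 2 ^ r + G xs byte (bit : Int) r := by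
  intro r
  induction r using Nat.strong_induction_on with
  | _ r ih =>
    intro byte bit val
    rw [decodeChunks]
    by_cases hr : r = 0
    · subst hr
      simp [G]
    · rw [if_neg hr]
      simp only []
      set take := if bit + 1 ≤ r then bit + 1 else r with htake
      have ht1 : 1 ≤ take := by rw [htake]; split <;> omega
      have ht2 : take ≤ bit + 1 := by rw [htake]; split <;> omega
      have ht3 : take ≤ r := by rw [htake]; split <;> omega
      have ht4 : take = bit + 1 ∨ take = r := by rw [htake]; split <;> omega
      rw [ih (r - take) (by omega)]
      rw [Gsplit xs take bit r byte ht2 ht3 ht4]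
      have hpow : (2:Int) ^ take * 2 ^ (r - take) = 2 ^ r := by
        rw [← pow_add]
        congr 1
        omega
      by_cases hc : take = bit + 1
      · rw [if_pos hc]
        rw [← hpow]
        ring
      · rw [if_neg hc]
        have hrt : r - take = 0 := by omega
        rw [hrt] at hpow ⊢
        simp only [G]
        rw [← hpow]
        ring

-- ===== VERDICT (by name: the statement is the Claim_ definition above) =====
theorem decode_bigend_sig_spec : Claim_equal_decode_bigend_sig := by
  unfold Claim_equal_decode_bigend_sig
  intro xs start len _ _
  unfold Spec_decode_bigend_sig
  simp only [decode_bigend_sig, decode_bigend_sig_alt]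
  rw [chunkG, zero_mul, zero_add]
  by_cases hl : len ≤ 0
  · rw [PySem.List.pyRange_one_eq_nil hl]
    have h0 : len.toNat = 0 := by omega
    rw [h0]
    simp [G]
  · have hml := PySem.Int.mod_nonneg start (b := (8:Int)) (by norm_num)
    have hmh := PySem.Int.mod_lt start (b := (8:Int)) (by norm_num)
    have hfm := PySem.Int.floordiv_mul_add_mod start 8
    rw [foldA xs len len.toNat 0 (PySem.Int.floordiv start 8)
      (start - PySem.Int.floordiv start 8 * 8) 0 (by omega) le_rfl ⟨0, by ring⟩]
    have hbit : ((PySem.Int.mod start 8).toNat : Int) = start - PySem.Int.floordiv start 8 * 8 := by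
      omega
    rw [hbit]
    ring
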